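-- pv_equiv track=rewrite | github.com/Akashid17/Diff_Betw_Factor_Non_Factor | Main.py | DiffFactors
-- ===== SOURCE A (Python) =====
-- def DiffFactors(iNo):
--
--     if iNo < 0:
--         iNo = -iNo
--
--     iDiff = 0
--
--     for x in range(1,iNo):
--         if iNo%x == 0:
--             iDiff += x
--         else:
--             iDiff -= x
--
--     return iDiff
-- ===== SOURCE B (Python) =====
-- def DiffFactors(iNo):
--     # Enumerate divisor pairs up to the square root of n, then combine the
--     # divisor sum with the closed-form triangle-number total.
--     n = -iNo if iNo < 0 else iNo
--     s = 0
--     d = 1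
--     while d * d <= n:
--         if n % d == 0:
--             s += d
--             q = n // d
--             if q != d:
--                 s += q
--         d += 1
--     return 2 * (s - n) - n * (n - 1) // 2
-- ===== Notes on version B (the rewrite author's own statement) =====
-- stated objective: faster
-- what changed: Replaces the O(n) signed scan over all x below n by divisor-pair enumeration up to the square root of n combined with a closed-form triangle-number total.
import Mathlib
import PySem

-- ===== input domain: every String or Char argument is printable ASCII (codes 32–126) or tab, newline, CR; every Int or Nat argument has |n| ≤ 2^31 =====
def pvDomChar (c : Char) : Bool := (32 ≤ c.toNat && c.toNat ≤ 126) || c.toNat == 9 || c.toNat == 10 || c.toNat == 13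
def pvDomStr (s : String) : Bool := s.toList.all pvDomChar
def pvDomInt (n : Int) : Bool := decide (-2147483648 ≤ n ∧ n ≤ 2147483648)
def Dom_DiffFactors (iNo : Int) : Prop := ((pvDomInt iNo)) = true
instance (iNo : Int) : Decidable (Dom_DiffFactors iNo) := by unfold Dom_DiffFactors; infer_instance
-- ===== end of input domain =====

-- B replaces A's O(n) signed scan by divisor-pair enumeration to sqrt(n) plus a closed form (objective: faster).

-- ===== PORT A =====
def DiffFactors (iNo : Int) : Int :=
  let iNo := if iNo < 0 then -iNo else iNo
  (PySem.List.pyRange 1 iNo 1).foldl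
    (fun iDiff x => if PySem.Int.mod iNo x = 0 then iDiff + x else iDiff - x) 0

-- ===== PORT B =====
-- `while d * d <= n: ...` loop of Source B
def pvAltLoop (n d s : Int) : Int :=
  if _h : d * d ≤ n then
    pvAltLoop n (d + 1)
      (if PySem.Int.mod n d = 0 then
        (if PySem.Int.floordiv n d ≠ d then (s + d) + PySem.Int.floordiv n d else s + d)
      else s)
  else s
termination_by (n + 1 - d).toNat
decreasing_by
  have hd : d ≤ d * d := by
    by_cases h1 : d ≤ 0
    · nlinarith [mul_self_nonneg d]
    · have h2 : 1 ≤ d := by omega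
      nlinarith [h2]
  omega

def DiffFactors_alt (iNo : Int) : Int :=
  let n := if iNo < 0 then -iNo else iNo
  let s := pvAltLoop n 1 0
  2 * (s - n) - PySem.Int.floordiv (n * (n - 1)) 2

-- ===== PRECONDITION & SPEC =====
def Spec_DiffFactors (iNo : Int) (out : Int) : Prop := out = DiffFactors_alt iNo
instance (iNo : Int) (out : Int) : Decidable (Spec_DiffFactors iNo out) := by unfold Spec_DiffFactors; infer_instance

-- ===== CLAIM (what is proved, stated in full; the proofs are below) =====
def Claim_equal_DiffFactors : Prop := ∀ (iNo : Int), Dom_DiffFactors iNo → Spec_DiffFactors iNo (DiffFactors iNo)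

-- ===== LEMMAS AND PROOFS =====

-- A's loop over range(1, N) is the signed divisor sum over 0 ≤ e < N.
lemma foldA_eq (N : Nat) : ∀ (k : Nat),
    (PySem.List.pyRange 1 ((k : Int) + 1) 1).foldl
      (fun iDiff x => if PySem.Int.mod (N : Int) x = 0 then iDiff + x else iDiff - x) 0
    = ∑ e ∈ Finset.range (k + 1), (if e ∣ N then (e : Int) else -(e : Int)) := by
  intro k
  induction k with
  | zero =>
      rw [show ((0 : Nat) : Int) + 1 = 1 by norm_num,
        PySem.List.pyRange_one_eq_nil (by norm_num)]
      rw [List.foldl_nil, show (0 : Nat) + 1 = 1 from rfl, Finset.sum_range_one]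
      split_ifs <;> simp
  | succ k ih =>
      rw [show ((k + 1 : Nat) : Int) + 1 = ((k : Int) + 1) + 1 by push_cast; ring,
        PySem.List.pyRange_one_succ_right (by omega), List.foldl_append,
        List.foldl_cons, List.foldl_nil, ih,
        Finset.sum_range_succ (f := fun e => if e ∣ N then (e : Int) else -(e : Int)) (n := k + 1)]
      have hdvd : PySem.Int.mod (N : Int) ((k : Int) + 1) = 0 ↔ (k + 1) ∣ N := by
        rw [PySem.Int.mod_eq_zero_iff_dvd,
          show ((k : Int) + 1) = ((k + 1 : Nat) : Int) by push_cast; ring,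
          Int.natCast_dvd_natCast]
      by_cases h : (k + 1) ∣ N
      · rw [if_pos (hdvd.mpr h), if_pos h]; push_cast; ring
      · rw [if_neg (fun hm => h (hdvd.mp hm)), if_neg h]; push_cast; ring

-- the set of divisors whose "pair minimum" equals d
lemma T_set (N d : Nat) (hN : 1 ≤ N) (hd : 1 ≤ d) (hdd : d * d ≤ N) :
    N.divisors.filter (fun e => min e (N / e) = d)
      = if d ∣ N then (if N / d = d then {d} else {d, N / d}) else ∅ := by
  have hdq : d ≤ N / d := (Nat.le_div_iff_mul_le (by omega)).mpr hdd
  ext e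
  simp only [Finset.mem_filter, Nat.mem_divisors]
  constructor
  · rintro ⟨⟨he, hN0⟩, hmin⟩
    rcases Nat.le_total e (N / e) with hle | hle
    · -- min = e, so e = d
      have hed : e = d := by omega
      subst hed
      rw [if_pos he]
      split_ifs <;> simp
    · -- min = N / e, so N / e = d, hence e = N / d
      have hqd : N / e = d := by omega
      have hddvd : d ∣ N := hqd ▸ Nat.div_dvd_of_dvd he
      have heq : e = N / d := by
        rw [← hqd, Nat.div_div_self he hN0]
      rw [if_pos hddvd]
      split_ifs with h2
      · simp [heq, h2]
      · simp [heq]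
  · intro h
    split_ifs at h with h1 h2
    · simp only [Finset.mem_singleton] at h
      subst h
      refine ⟨⟨h1, by omega⟩, ?_⟩
      omega
    · simp only [Finset.mem_insert, Finset.mem_singleton] at h
      rcases h with rfl | rfl
      · exact ⟨⟨h1, by omega⟩, by omega⟩
      · refine ⟨⟨Nat.div_dvd_of_dvd h1, by omega⟩, ?_⟩
        rw [Nat.div_div_self h1 (by omega)]
        omega
    · simp at h

-- once d*d > N every divisor has been collected
lemma done_set (N d : Nat) (hdd : N < d * d) :
    N.divisors.filter (fun e => min e (N / e) < d) = N.divisors := by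
  apply Finset.filter_true_of_mem
  intro e he
  rw [Nat.mem_divisors] at he
  obtain ⟨hdvd, hN0⟩ := he
  have h1 : min e (N / e) * min e (N / e) ≤ N := by
    calc min e (N / e) * min e (N / e) ≤ e * (N / e) :=
          Nat.mul_le_mul (min_le_left _ _) (min_le_right _ _)
      _ = N := Nat.mul_div_cancel' hdvd
  by_contra hc
  have h2 : d ≤ min e (N / e) := by omega
  have h3 : d * d ≤ min e (N / e) * min e (N / e) := Nat.mul_le_mul h2 h2
  omega

lemma altLoop_inv (N : Nat) (hN : 1 ≤ N) :
    ∀ (m d : Nat), 1 ≤ d → N + 1 - d ≤ m →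
    pvAltLoop (N : Int) (d : Int)
        (∑ e ∈ N.divisors.filter (fun e => min e (N / e) < d), (e : Int))
      = ∑ e ∈ N.divisors, (e : Int) := by
  intro m
  induction m with
  | zero =>
      intro d hd hm
      have hNd : N < d * d := by nlinarith [show N < d by omega]
      have hc : ¬ ((d : Int) * (d : Int) ≤ (N : Int)) := by
        exact_mod_cast not_le.mpr hNd
      rw [pvAltLoop, dif_neg hc, done_set N d hNd]
  | succ m ih =>
      intro d hd hm
      by_cases hdd : d * d ≤ N
      · have hc : (d : Int) * (d : Int) ≤ (N : Int) := by exact_mod_cast hdd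
        rw [pvAltLoop, dif_pos hc]
        have hmod : (PySem.Int.mod (N : Int) (d : Int) = 0) ↔ d ∣ N := by
          rw [PySem.Int.mod_eq_zero_iff_dvd, Int.natCast_dvd_natCast]
        have hfd : PySem.Int.floordiv (N : Int) (d : Int) = ((N / d : Nat) : Int) :=
          PySem.Int.floordiv_natCast N d
        have hsplit : N.divisors.filter (fun e => min e (N / e) < d + 1)
            = N.divisors.filter (fun e => min e (N / e) < d)
              ∪ N.divisors.filter (fun e => min e (N / e) = d) := by
          rw [← Finset.filter_or]
          apply Finset.filter_congr
          intro e _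
          constructor <;> (intro h; omega)
        have hdisj : Disjoint (N.divisors.filter (fun e => min e (N / e) < d))
            (N.divisors.filter (fun e => min e (N / e) = d)) := by
          rw [Finset.disjoint_left]
          intro e h1 h2
          simp only [Finset.mem_filter] at h1 h2
          omega
        have harg : (if PySem.Int.mod (N : Int) (d : Int) = 0 then
              (if PySem.Int.floordiv (N : Int) (d : Int) ≠ (d : Int) then
                ((∑ e ∈ N.divisors.filter (fun e => min e (N / e) < d), (e : Int)) + d)
                  + PySem.Int.floordiv (N : Int) (d : Int)
              else (∑ e ∈ N.divisors.filter (fun e => min e (N / e) < d), (e : Int)) + d)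
            else (∑ e ∈ N.divisors.filter (fun e => min e (N / e) < d), (e : Int)))
            = ∑ e ∈ N.divisors.filter (fun e => min e (N / e) < d + 1), (e : Int) := by
          rw [hsplit, Finset.sum_union hdisj, T_set N d hN hd hdd, hfd]
          by_cases hdN : d ∣ N
          · rw [if_pos (hmod.mpr hdN), if_pos hdN]
            by_cases hq : N / d = d
            · simp only [if_neg (show ¬ (((N / d : Nat) : Int) ≠ (d : Int)) by simp [hq]), if_pos hq,
                Finset.sum_singleton]
            · rw [if_pos (by exact_mod_cast fun hcast => hq (by exact_mod_cast hcast)),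
                if_neg hq, Finset.sum_pair (by omega)]
              push_cast; ring
          · rw [if_neg (fun hm0 => hdN (hmod.mp hm0)), if_neg hdN, Finset.sum_empty, add_zero]
        rw [harg, show (d : Int) + 1 = ((d + 1 : Nat) : Int) by push_cast; ring]
        exact ih (d + 1) (by omega) (by omega)
      · have hc : ¬ ((d : Int) * (d : Int) ≤ (N : Int)) := by
          intro h; exact hdd (by exact_mod_cast h)
        rw [pvAltLoop, dif_neg hc, done_set N d (by omega)]

lemma altLoop_eq_sigma (N : Nat) (hN : 1 ≤ N) :
    pvAltLoop (N : Int) 1 0 = ∑ e ∈ N.divisors, (e : Int) := by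
  have h0 : N.divisors.filter (fun e => min e (N / e) < 1) = ∅ := by
    rw [Finset.filter_eq_empty_iff]
    intro e he
    rw [Nat.mem_divisors] at he
    have he1 : 1 ≤ e := Nat.pos_of_dvd_of_pos he.1 (by omega)
    have he2 : 1 ≤ N / e := Nat.one_le_div_iff (by omega) |>.mpr (Nat.le_of_dvd (by omega) he.1)
    omega
  have := altLoop_inv N hN (N + 1) 1 (by omega) (by omega)
  rw [h0, Finset.sum_empty] at this
  exact_mod_cast this

lemma main_nat (N : Nat) : DiffFactors (N : Int) = DiffFactors_alt (N : Int) := by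
  unfold DiffFactors DiffFactors_alt
  have hnn : ¬ ((N : Int) < 0) := by omega
  simp only [if_neg hnn]
  rcases Nat.eq_zero_or_pos N with rfl | hN
  · rw [pvAltLoop]
    norm_num [PySem.List.pyRange_one_eq_nil, PySem.Int.floordiv]
  · -- LHS
    have hL : (PySem.List.pyRange 1 (N : Int) 1).foldl
        (fun iDiff x => if PySem.Int.mod (N : Int) x = 0 then iDiff + x else iDiff - x) 0
        = ∑ e ∈ Finset.range N, (if e ∣ N then (e : Int) else -(e : Int)) := by
      have := foldA_eq N (N - 1)
      rw [show ((N - 1 : Nat) : Int) + 1 = (N : Int) by omega, show N - 1 + 1 = N by omega] at this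
      exact this
    rw [hL, altLoop_eq_sigma N hN]
    -- signed sum = 2 * (proper-divisor sum) - triangle sum
    have hsigned : ∑ e ∈ Finset.range N, (if e ∣ N then (e : Int) else -(e : Int))
        = 2 * (∑ e ∈ Finset.range N, (if e ∣ N then (e : Int) else 0))
          - ∑ e ∈ Finset.range N, (e : Int) := by
      rw [Finset.mul_sum, ← Finset.sum_sub_distrib]
      apply Finset.sum_congr rfl
      intro e _
      split_ifs <;> ring
    have hprop : (∑ e ∈ Finset.range N, (if e ∣ N then (e : Int) else 0))
        = ∑ e ∈ N.properDivisors, (e : Int) := by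
      rw [← Finset.sum_filter, ← Nat.filter_dvd_eq_properDivisors (by omega)]
    have hsig : (∑ e ∈ N.divisors, (e : Int))
        = (∑ e ∈ N.properDivisors, (e : Int)) + (N : Int) := by
      have h := Nat.sum_divisors_eq_sum_properDivisors_add_self (n := N)
      have h2 := congrArg (fun x : Nat => (x : Int)) h
      push_cast at h2
      exact h2
    have htri : PySem.Int.floordiv ((N : Int) * ((N : Int) - 1)) 2
        = ∑ e ∈ Finset.range N, (e : Int) := by
      have hmul : (∑ i ∈ Finset.range N, i) * 2 = N * (N - 1) := Finset.sum_range_id_mul_two N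
      have hcast : (N : Int) * ((N : Int) - 1) = ((N * (N - 1) : Nat) : Int) := by
        push_cast [Nat.cast_sub hN]; ring
      rw [hcast, show (2 : Int) = ((2 : Nat) : Int) by norm_num, PySem.Int.floordiv_natCast]
      rw [← hmul, Nat.mul_div_cancel _ (by norm_num)]
      push_cast; ring
    rw [hsigned, hprop, hsig, htri]
    ring

-- ===== VERDICT (by name: the statement is the Claim_ definition above) =====
theorem DiffFactors_spec : Claim_equal_DiffFactors := by
  intro iNo _
  unfold Spec_DiffFactors DiffFactors DiffFactors_alt
  by_cases h : iNo < 0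
  · simp only [if_pos h]
    have := main_nat (-iNo).toNat
    rw [Int.toNat_of_nonneg (by omega)] at this
    unfold DiffFactors DiffFactors_alt at this
    simpa only [if_neg (show ¬ (-iNo < 0) by omega)] using this
  · simp only [if_neg h]
    have := main_nat iNo.toNat
    rw [Int.toNat_of_nonneg (by omega)] at this
    unfold DiffFactors DiffFactors_alt at this
    simpa only [if_neg h] using this
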